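-- pv_equiv track=rewrite | github.com/PrinceSinghhub/GFG-Questions | Frogs and Jumps.py | unvisitedLeaves
-- ===== SOURCE A (Python) =====
-- def unvisitedLeaves(N, leaves, frogs):
--     # code here
--     # frogs.sort()
--     v = [0] * (leaves + 1)
--
--     for i in range(N):
--         if frogs[i] > leaves:
--             continue
--         if not v[frogs[i]]:
--             for j in range(frogs[i], (leaves + 1), frogs[i]):
--                 v[j] = 1
--     ans = 0
--     for i in v:
--         ans += not i
--     return ans - 1
-- ===== SOURCE B (Python) =====
-- def unvisitedLeaves(N, leaves, frogs):
--     jumps = [f for f in frogs[:max(0, N)] if f >= 1]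
--     ans = 0
--     for leaf in range(leaves + 1):
--         # a frog with jump f lands exactly on f, 2f, 3f, ... (never on 0)
--         if not any(f <= leaf and leaf % f == 0 for f in jumps):
--             ans += 1
--     return ans - 1  # position 0 is never landed on; drop it
-- ===== Notes on version B (the rewrite author's own statement) =====
-- stated objective: alternative
-- what changed: B replaces A's sieve (allocate a visited array of size leaves+1 and mark every multiple of each frog) by a direct count: for each position 0..leaves it tests whether some positive frog jump lands there (f <= leaf and leaf % f == 0) and counts the untouched positions, dropping position 0 which is never landed on; no array is built.
import Mathlib
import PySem

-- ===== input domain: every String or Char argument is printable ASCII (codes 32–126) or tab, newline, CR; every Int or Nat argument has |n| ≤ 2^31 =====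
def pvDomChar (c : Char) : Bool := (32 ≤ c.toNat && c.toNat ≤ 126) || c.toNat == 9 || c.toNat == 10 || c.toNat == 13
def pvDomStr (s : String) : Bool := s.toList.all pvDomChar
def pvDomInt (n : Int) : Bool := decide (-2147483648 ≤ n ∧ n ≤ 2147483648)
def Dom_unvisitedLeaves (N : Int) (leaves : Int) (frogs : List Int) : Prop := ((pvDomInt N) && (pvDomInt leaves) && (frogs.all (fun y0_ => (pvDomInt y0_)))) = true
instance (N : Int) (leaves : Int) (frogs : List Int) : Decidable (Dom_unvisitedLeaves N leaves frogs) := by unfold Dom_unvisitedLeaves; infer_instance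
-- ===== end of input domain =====

-- B replaces A's sieve over a visited array by a direct divisibility count per leaf position
-- (alternative decomposition, similar cost; equivalence proved on Pre_).

-- ===== PORT A =====
-- literal transliteration of A's sieve: v = [0]*(leaves+1); mark multiples of each frog; count zeros; -1
def unvisitedLeaves (N : Int) (leaves : Int) (frogs : List Int) : Int :=
  let v0 : List Int := List.replicate (leaves + 1).toNat 0
  let v := (PySem.List.pyRange 0 N 1).foldl (fun v i =>
      let f := PySem.List.pyGetD frogs i 0
      if f > leaves then v
      else if ¬ (PySem.List.pyGetD v f 0 = 0) then v
      else (PySem.List.pyRange f (leaves + 1) f).foldl (fun v j => PySem.List.pySetD v j 1) v) v0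
  let ans := v.foldl (fun a x => a + (if x = 0 then 1 else 0)) 0
  ans - 1

-- ===== PORT B =====
-- literal transliteration of Source B: positive jumps among frogs[:N]; count positions 0..leaves no frog
-- lands on (a frog with jump f lands on f, 2f, ...); drop the never-landed-on position 0
def unvisitedLeaves_alt (N : Int) (leaves : Int) (frogs : List Int) : Int :=
  let jumps := (PySem.List.slice frogs none (some (max 0 N))).filter (fun f => decide (1 ≤ f))
  let ans := (PySem.List.pyRange 0 (leaves + 1) 1).foldl
    (fun ans leaf => if !(jumps.any (fun f => decide (f ≤ leaf) && decide (PySem.Int.mod leaf f = 0)))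
      then ans + 1 else ans) 0
  ans - 1

-- ===== PRECONDITION & SPEC =====
-- Pre_ excludes exactly the inputs where the Python A raises: N out of range for frogs (IndexError);
-- for leaves ≥ 0, a zero frog among the first N (ValueError: range step 0) or a frog below
-- -(leaves+1) (IndexError on v[frogs[i]]); for leaves < 0 (v is empty), a frog ≤ leaves
-- (IndexError on v[frogs[i]]).
def Pre_unvisitedLeaves (N : Int) (leaves : Int) (frogs : List Int) : Prop :=
  N ≤ frogs.length ∧
    ∀ f ∈ frogs.take N.toNat,
      if 0 ≤ leaves then f ≠ 0 ∧ -(leaves + 1) ≤ f else leaves < f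
instance (N : Int) (leaves : Int) (frogs : List Int) : Decidable (Pre_unvisitedLeaves N leaves frogs) := by unfold Pre_unvisitedLeaves; infer_instance
def pvWitness_unvisitedLeaves : Int × Int × List Int := (2, 6, [2, 3])

def Spec_unvisitedLeaves (N : Int) (leaves : Int) (frogs : List Int) (out : Int) : Prop := out = unvisitedLeaves_alt N leaves frogs
instance (N : Int) (leaves : Int) (frogs : List Int) (out : Int) : Decidable (Spec_unvisitedLeaves N leaves frogs out) := by unfold Spec_unvisitedLeaves; infer_instance

-- ===== CLAIM (what is proved, stated in full; the proofs are below) =====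
def Claim_equal_unvisitedLeaves : Prop := ∀ (N : Int) (leaves : Int) (frogs : List Int), Dom_unvisitedLeaves N leaves frogs → Pre_unvisitedLeaves N leaves frogs → Spec_unvisitedLeaves N leaves frogs (unvisitedLeaves N leaves frogs)

-- ===== LEMMAS AND PROOFS =====

-- "position k is marked by one of the jumps in S": k ≥ 1 and some positive f ∈ S divides k
def pvMarked (S : List Int) (k : Int) : Bool :=
  decide (1 ≤ k) && S.any (fun f => decide (1 ≤ f) && decide (f ∣ k))

-- A's inner loop body (definitionally the lambda in the port)
def pvBodyA (leaves : Int) (v : List Int) (f : Int) : List Int :=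
  if f > leaves then v
  else if ¬ (PySem.List.pyGetD v f 0 = 0) then v
  else (PySem.List.pyRange f (leaves + 1) f).foldl (fun v j => PySem.List.pySetD v j 1) v

theorem pyRange_neg_nil (a b s : Int) (hs : s < 0) (hab : a ≤ b) :
    PySem.List.pyRange a b s = [] := by
  simp only [PySem.List.pyRange]
  rw [if_neg (by omega), if_neg (by omega), if_neg (by omega)]
  simp

theorem mark_length (js : List Int) (v : List Int) :
    (js.foldl (fun v j => PySem.List.pySetD v j 1) v).length = v.length := by
  induction js generalizing v with
  | nil => rfl
  | cons j t ih => simp [ih, PySem.List.length_pySetD]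

theorem mark_getD (js : List Int) (v : List Int) (k : Nat)
    (hpos : ∀ j ∈ js, 1 ≤ j ∧ j.toNat < v.length) :
    (js.foldl (fun v j => PySem.List.pySetD v j 1) v).getD k 0 =
      if (js.any (fun j => decide (j = (k : Int)))) then 1 else v.getD k 0 := by
  induction js generalizing v with
  | nil => simp
  | cons j t ih =>
    obtain ⟨hj, hjl⟩ := hpos j (by simp)
    have ht : ∀ x ∈ t, 1 ≤ x ∧ x.toNat < (PySem.List.pySetD v j 1).length := by
      intro x hx
      have := hpos x (by simp [hx])
      simpa [PySem.List.length_pySetD] using this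
    simp only [List.foldl_cons, List.any_cons, ih _ ht]
    rw [PySem.List.pySetD_of_nonneg _ _ (by omega)]
    by_cases hk : j = (k : Int)
    · subst hk
      simp only [decide_true, Bool.true_or, if_true]
      split
      · rfl
      · rw [List.getD_eq_getElem?_getD, List.getElem?_set]
        simp only [Int.toNat_natCast] at hjl
        simp [hjl]
    · have : j.toNat ≠ k := by omega
      simp only [hk, decide_false, Bool.false_or]
      split
      · rfl
      · rw [List.getD_eq_getElem?_getD, List.getD_eq_getElem?_getD, List.getElem?_set_ne this]

theorem pvMarked_append_single (S : List Int) (f k : Int) :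
    pvMarked (S ++ [f]) k
      = (pvMarked S k || (decide (1 ≤ k) && (decide (1 ≤ f) && decide (f ∣ k)))) := by
  simp [pvMarked, List.any_append, Bool.and_or_distrib_left]

theorem pvMarked_true_iff (S : List Int) (k : Int) :
    pvMarked S k = true ↔ 1 ≤ k ∧ ∃ f ∈ S, 1 ≤ f ∧ f ∣ k := by
  simp [pvMarked]

-- appending a jump that cannot mark any position ≤ leaves changes nothing there
theorem pvMarked_append_irrel (S : List Int) (f k : Int)
    (h : ¬ (1 ≤ k ∧ 1 ≤ f ∧ f ∣ k)) :
    pvMarked (S ++ [f]) k = pvMarked S k := by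
  rw [pvMarked_append_single]
  cases hb : pvMarked S k
  · simp only [Bool.false_or]
    rw [Bool.eq_false_iff]
    intro hc
    simp only [Bool.and_eq_true, decide_eq_true_eq] at hc
    exact h ⟨hc.1, hc.2.1, hc.2.2⟩
  · simp

theorem pvMarked_append_covered (S : List Int) (f k : Int)
    (h : (1 ≤ k ∧ 1 ≤ f ∧ f ∣ k) → pvMarked S k = true) :
    pvMarked (S ++ [f]) k = pvMarked S k := by
  rw [pvMarked_append_single]
  cases hb : pvMarked S k
  · simp only [Bool.false_or]
    rw [Bool.eq_false_iff]
    intro hc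
    simp only [Bool.and_eq_true, decide_eq_true_eq] at hc
    rw [h ⟨hc.1, hc.2.1, hc.2.2⟩] at hb
    exact absurd hb (by simp)
  · simp

-- one step of A's outer loop preserves the marking invariant
theorem bodyA_inv (leaves : Int) (hleaves : 0 ≤ leaves) (S : List Int) (v : List Int) (f : Int)
    (hf0 : f ≠ 0)
    (hlen : v.length = (leaves + 1).toNat)
    (hv : ∀ k : Nat, k < v.length → v.getD k 0 = if pvMarked S k then 1 else 0) :
    (pvBodyA leaves v f).length = (leaves + 1).toNat ∧
      ∀ k : Nat, k < (pvBodyA leaves v f).length →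
        (pvBodyA leaves v f).getD k 0 = if pvMarked (S ++ [f]) k then 1 else 0 := by
  have hkbound : ∀ k : Nat, k < v.length → (k : Int) < leaves + 1 := by
    intro k hk; rw [hlen] at hk; omega
  unfold pvBodyA
  by_cases h1 : f > leaves
  · rw [if_pos h1]
    refine ⟨hlen, fun k hk => ?_⟩
    have hbd := hkbound k hk
    rw [hv k hk, pvMarked_append_irrel S f _ (by
      rintro ⟨hk1, hf1, hdvd⟩
      have : f ≤ (k : Int) := Int.le_of_dvd (by omega) hdvd
      omega)]
  · rw [if_neg h1]
    by_cases hf1 : 1 ≤ f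
    · -- a genuine positive jump, f ≤ leaves
      have hfl : f ≤ leaves := by omega
      have hfidx : f.toNat < v.length := by rw [hlen]; omega
      have hval : PySem.List.pyGetD v f 0 = if pvMarked S f then 1 else 0 := by
        rw [PySem.List.pyGetD_eq_getElem _ _ (by omega) (by omega : f < (v.length : Int)),
            ← List.getD_eq_getElem v 0 hfidx, hv f.toNat hfidx,
            Int.toNat_of_nonneg (by omega : (0:Int) ≤ f)]
      by_cases hskip : ¬ (PySem.List.pyGetD v f 0 = 0)
      · -- v[f] already marked: some earlier g divides f, so f adds nothing
        rw [if_pos hskip]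
        refine ⟨hlen, fun k hk => ?_⟩
        have hmS : pvMarked S f = true := by
          by_contra hb
          rw [Bool.not_eq_true] at hb
          rw [hval, hb] at hskip; simp at hskip
        obtain ⟨-, g, hgS, hg1, hgdvd⟩ := (pvMarked_true_iff S f).1 hmS
        rw [hv k hk, pvMarked_append_covered S f _ (fun hc =>
          (pvMarked_true_iff S _).2 ⟨hc.1, g, hgS, hg1, hgdvd.trans hc.2.2⟩)]
      · -- mark every multiple of f up to leaves
        rw [if_neg hskip]
        have hR : ∀ j ∈ PySem.List.pyRange f (leaves + 1) f, 1 ≤ j ∧ j.toNat < v.length := by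
          intro j hj
          rw [PySem.List.mem_pyRange_iff_of_pos (by omega)] at hj
          refine ⟨by omega, ?_⟩
          rw [hlen]; omega
        refine ⟨by rw [mark_length, hlen], fun k hk => ?_⟩
        rw [mark_length] at hk
        rw [mark_getD _ _ _ hR, hv k hk]
        have hmem : ((PySem.List.pyRange f (leaves + 1) f).any
            (fun j => decide (j = (k : Int)))) = true ↔ (f ∣ (k : Int) ∧ f ≤ (k : Int)) := by
          simp only [List.any_eq_true, decide_eq_true_eq]
          constructor
          · rintro ⟨j, hj, rfl⟩
            rw [PySem.List.mem_pyRange_iff_of_pos (by omega)] at hj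
            exact ⟨by simpa using dvd_add hj.2.2 (dvd_refl f), hj.1⟩
          · rintro ⟨hdvd, hle⟩
            refine ⟨(k : Int), ?_, rfl⟩
            rw [PySem.List.mem_pyRange_iff_of_pos (by omega)]
            exact ⟨hle, hkbound k hk, dvd_sub hdvd dvd_rfl⟩
        cases hin : ((PySem.List.pyRange f (leaves + 1) f).any (fun j => decide (j = (k : Int))))
        · rw [if_neg (by simp)]
          rw [Bool.eq_false_iff] at hin
          rw [pvMarked_append_irrel S f _ (by
            rintro ⟨hk1, -, hdvd⟩
            exact hin (hmem.2 ⟨hdvd, Int.le_of_dvd (by omega) hdvd⟩))]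
        · rw [if_pos (by simp)]
          obtain ⟨hdvd, hle⟩ := hmem.1 hin
          have : pvMarked (S ++ [f]) (k : Int) = true := by
            rw [pvMarked_true_iff]
            exact ⟨by omega, f, by simp, hf1, hdvd⟩
          rw [this]; simp
    · -- negative jump (f ≠ 0): both branches leave v unchanged, and f marks nothing
      have hfneg : f < 0 := by omega
      have hnil : PySem.List.pyRange f (leaves + 1) f = [] :=
        pyRange_neg_nil _ _ _ hfneg (by omega)
      have hid : (if ¬ (PySem.List.pyGetD v f 0 = 0) then v
          else (PySem.List.pyRange f (leaves + 1) f).foldl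
            (fun v j => PySem.List.pySetD v j 1) v) = v := by
        rw [hnil]; split <;> rfl
      rw [hid]
      refine ⟨hlen, fun k hk => ?_⟩
      rw [hv k hk, pvMarked_append_irrel S f _ (by rintro ⟨-, hc, -⟩; omega)]

-- the whole outer loop establishes the invariant
theorem foldA_inv (leaves : Int) (hleaves : 0 ≤ leaves) (js : List Int)
    (hjs : ∀ f ∈ js, f ≠ 0) :
    ∀ S v, v.length = (leaves + 1).toNat →
      (∀ k : Nat, k < v.length → v.getD k 0 = if pvMarked S k then 1 else 0) →
      (js.foldl (pvBodyA leaves) v).length = (leaves + 1).toNat ∧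
        ∀ k : Nat, k < (js.foldl (pvBodyA leaves) v).length →
          (js.foldl (pvBodyA leaves) v).getD k 0 = if pvMarked (S ++ js) k then 1 else 0 := by
  induction js with
  | nil => intro S v h1 h2; simpa using ⟨h1, h2⟩
  | cons f t ih =>
    intro S v h1 h2
    have hstep := bodyA_inv leaves hleaves S v f (hjs f (by simp)) h1 h2
    have := ih (fun x hx => hjs x (by simp [hx])) (S ++ [f]) (pvBodyA leaves v f) hstep.1 hstep.2
    simpa using this

-- the loop over range(N) with frogs[i] is the loop over frogs[:N]
theorem foldA_take (N : Int) (frogs : List Int) (hNl : N ≤ frogs.length)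
    {β : Type} (g : β → Int → β) (init : β) :
    (PySem.List.pyRange 0 N 1).foldl (fun acc i => g acc (PySem.List.pyGetD frogs i 0)) init =
      (frogs.take N.toNat).foldl g init := by
  by_cases hN : 0 ≤ N
  case neg =>
    rw [PySem.List.pyRange_one_eq_nil (by omega), show N.toNat = 0 from by omega]
    rfl
  have hlen : ((frogs.take N.toNat).length : Int) = N := by
    simp [List.length_take]; omega
  have hbase := PySem.List.foldl_pyRange_zero_pyGetD' (frogs.take N.toNat) 0 g init
  rw [hlen] at hbase
  rw [← hbase]
  apply PySem.List.foldl_congr_mem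
  intro acc i hi
  rw [PySem.List.mem_pyRange_one] at hi
  congr 1
  rw [PySem.List.pyGetD_eq_getElem _ _ hi.1 (by omega : i < (frogs.length : Int)),
      PySem.List.pyGetD_eq_getElem _ _ hi.1 (by rw [hlen]; exact hi.2)]
  rw [List.getElem_take]

-- the zero-count of a 0/1 vector given pointwise, as a countP over the index range
theorem countA (leaves : Int) (_hleaves : 0 ≤ leaves) (v : List Int) (P : Nat → Bool)
    (hlen : v.length = (leaves + 1).toNat)
    (hv : ∀ k : Nat, k < v.length → v.getD k 0 = if P k then 1 else 0) :
    v.foldl (fun a x => a + (if x = 0 then 1 else 0)) 0 =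
      ((List.range (leaves + 1).toNat).countP (fun k => !P k) : Int) := by
  have hveq : v = (List.range (leaves + 1).toNat).map (fun k => if P k then (1:Int) else 0) := by
    apply List.ext_getElem
    · simp [hlen]
    · intro k h1 h2
      have hk : k < v.length := h1
      have := hv k hk
      rw [List.getD_eq_getElem v 0 hk] at this
      simp only [List.getElem_map, List.getElem_range]
      exact this
  rw [hveq, PySem.List.foldl_add (g := fun x => if x = 0 then (1:Int) else 0),
      List.map_map]
  rw [show ((fun x => if x = 0 then (1:Int) else 0) ∘ fun k => if P k then (1:Int) else 0)
        = fun k => if !P k then (1:Int) else 0 from by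
    funext k; by_cases h : P k <;> simp [h]]
  rw [PySem.List.sum_map_ite_one_zero]
  simp

-- when every processed frog exceeds leaves, A's outer loop does nothing
theorem foldl_bodyA_id (leaves : Int) (l : List Int) (v : List Int)
    (h : ∀ f ∈ l, leaves < f) : l.foldl (pvBodyA leaves) v = v := by
  induction l generalizing v with
  | nil => rfl
  | cons f t ih =>
    rw [List.foldl_cons,
        show pvBodyA leaves v f = v from by unfold pvBodyA; rw [if_pos (h f (by simp))]]
    exact ih v (fun x hx => h x (List.mem_cons_of_mem _ hx))

-- B's landing test agrees with the marking predicate on nonnegative positions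
theorem pvMarked_any (js : List Int) (m : Int) (hm : 0 ≤ m) :
    ((js.filter (fun f => decide (1 ≤ f))).any
        (fun f => decide (f ≤ m) && decide (PySem.Int.mod m f = 0))) = pvMarked js m := by
  rw [Bool.eq_iff_iff, pvMarked_true_iff]
  simp only [List.any_eq_true, List.mem_filter, Bool.and_eq_true, decide_eq_true_eq,
    PySem.Int.mod_eq_zero_iff_dvd]
  constructor
  · rintro ⟨f, ⟨hfm, hf1⟩, hle, hdvd⟩
    exact ⟨by omega, f, hfm, hf1, hdvd⟩
  · rintro ⟨hm1, f, hfm, hf1, hdvd⟩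
    exact ⟨f, ⟨hfm, hf1⟩, Int.le_of_dvd (by omega) hdvd, hdvd⟩

-- ===== VERDICT (by name: the statement is the Claim_ definition above) =====
theorem unvisitedLeaves_spec : Claim_equal_unvisitedLeaves := by
  intro N leaves frogs _hdom hpre
  obtain ⟨hNl, hfr⟩ := hpre
  unfold Spec_unvisitedLeaves
  have hA : unvisitedLeaves N leaves frogs =
      ((frogs.take N.toNat).foldl (pvBodyA leaves)
        (List.replicate (leaves + 1).toNat (0:Int))).foldl
        (fun a x => a + (if x = 0 then 1 else 0)) 0 - 1 := by
    rw [show unvisitedLeaves N leaves frogs =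
        ((PySem.List.pyRange 0 N 1).foldl
            (fun acc i => pvBodyA leaves acc (PySem.List.pyGetD frogs i 0))
            (List.replicate (leaves + 1).toNat 0)).foldl
          (fun a x => a + (if x = 0 then 1 else 0)) 0 - 1 from rfl]
    rw [foldA_take N frogs hNl]
  have hB : unvisitedLeaves_alt N leaves frogs =
      (PySem.List.pyRange 0 (leaves + 1) 1).foldl
        (fun ans leaf => if !(((frogs.take N.toNat).filter (fun f => decide (1 ≤ f))).any
            (fun f => decide (f ≤ leaf) && decide (PySem.Int.mod leaf f = 0)))
          then ans + 1 else ans) 0 - 1 := by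
    rw [show unvisitedLeaves_alt N leaves frogs =
        (PySem.List.pyRange 0 (leaves + 1) 1).foldl
          (fun ans leaf => if !(((PySem.List.slice frogs none (some (max 0 N))).filter
              (fun f => decide (1 ≤ f))).any
              (fun f => decide (f ≤ leaf) && decide (PySem.Int.mod leaf f = 0)))
            then ans + 1 else ans) 0 - 1 from rfl]
    rw [PySem.List.slice_to _ (by omega : (0:Int) ≤ max 0 N),
        show (max 0 N).toNat = N.toNat from by omega]
  by_cases hneg : leaves < 0
  · -- no leaves at all: A's array is empty and B's range is empty; both return -1
    rw [hA, hB]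
    rw [foldl_bodyA_id leaves _ _ (by
      intro f hf
      have := hfr f hf
      rwa [if_neg (by omega)] at this)]
    rw [show (leaves + 1).toNat = 0 from by omega,
        PySem.List.pyRange_one_eq_nil (by omega)]
    simp
  · have hleaves : (0:Int) ≤ leaves := by omega
    have hfr2 : ∀ f ∈ frogs.take N.toNat, f ≠ 0 ∧ -(leaves + 1) ≤ f := by
      intro f hf
      have := hfr f hf
      rwa [if_pos hleaves] at this
    have hfr' : ∀ f ∈ frogs.take N.toNat, f ≠ 0 := fun f hf => (hfr2 f hf).1
    have hinit2 : ∀ k : Nat, k < (List.replicate (leaves + 1).toNat (0:Int)).length →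
        (List.replicate (leaves + 1).toNat (0:Int)).getD k 0
          = if pvMarked [] k then 1 else 0 := by
      intro k hk
      rw [List.getD_replicate _ (by simpa using hk)]
      simp [pvMarked]
    have hinv := foldA_inv leaves hleaves (frogs.take N.toNat) hfr'
        [] (List.replicate (leaves + 1).toNat (0:Int)) (by simp) hinit2
    rw [List.nil_append] at hinv
    have hcount := countA leaves hleaves _ (fun k => pvMarked (frogs.take N.toNat) k)
        hinv.1 hinv.2
    rw [hA, hB, hcount, PySem.List.foldl_if_add_one]
    rw [PySem.List.pyRange_one 0 (leaves + 1), List.countP_map]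
    have hcongr : ∀ x ∈ List.range ((leaves + 1) - 0).toNat,
        ((fun k : Nat => !pvMarked (frogs.take N.toNat) k) x = true)
          ↔ (((fun leaf => !(((frogs.take N.toNat).filter (fun f => decide (1 ≤ f))).any
              (fun f => decide (f ≤ leaf) && decide (PySem.Int.mod leaf f = 0))))
              ∘ fun k : Nat => 0 + (k : Int)) x = true) := by
      intro x _
      simp only [Function.comp_apply]
      rw [show (0 + (x : Int)) = (x : Int) from by omega,
          pvMarked_any _ _ (by omega : (0:Int) ≤ (x : Int))]
    rw [← List.countP_congr hcongr]
    have hsub : ((leaves + 1) - 0).toNat = (leaves + 1).toNat := by omega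
    rw [hsub]
    simp
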